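-- pv_equiv track=rewrite | github.com/boostcampaitech7/level2-nlp-generationfornlp-nlp-02-lv3 | ensemble/hard_voting.py | hard_voting_with_priority
-- ===== SOURCE A (Python) =====
-- from collections import Counter
--
-- def hard_voting_with_priority(predictions, priority_order):
--     result = {}
--     for id in predictions[0].keys():
--         answers = [pred[id] for pred in predictions if id in pred]
--         answer_counts = Counter(answer for answer in answers if answer)
--
--         if answer_counts:
--             max_count = max(answer_counts.values())
--             top_answers = [ans for ans, count in answer_counts.items() if count == max_count]
--
--             if len(top_answers) == 1:
--                 result[id] = top_answers[0]
--             else: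
--                 for model in priority_order:
--                     model_index = next((i for i, pred in enumerate(predictions) if pred.get("filename") == model), None)
--                     if model_index is not None:
--                         model_answer = predictions[model_index].get(id, "")
--                         if model_answer in top_answers:
--                             result[id] = model_answer
--                             break
--                 else:
--                     result[id] = top_answers[0]
--         else:
--             result[id] = ""
--     return result
-- ===== SOURCE B (Python) =====
-- def hard_voting_with_priority(predictions, priority_order):
--     ids = list(predictions[0].keys())
--     # one pass: per-id ordered vote counts + first-wins filename index
--     votes = {}
--     by_filename = {}
--     for pred in predictions:
--         fname = pred.get("filename")
--         if fname is not None and fname not in by_filename: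
--             by_filename[fname] = pred
--         for key, ans in pred.items():
--             if ans:
--                 counts = votes.setdefault(key, {})
--                 counts[ans] = counts.get(ans, 0) + 1
--     result = {}
--     for id in ids:
--         counts = votes.get(id, {})
--         if not counts:
--             result[id] = ""
--             continue
--         mx = max(counts.values())
--         top = [a for a, c in counts.items() if c == mx]
--         if len(top) == 1:
--             result[id] = top[0]
--         else:
--             result[id] = _pick(by_filename, priority_order, id, top)
--     return result
--
-- def _pick(by_filename, priority_order, id, top):
--     for model in priority_order:
--         pred = by_filename.get(model)
--         if pred is not None:
--             ma = pred.get(id, "")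
--             if ma in top:
--                 return ma
--     return top[0]
-- ===== Notes on version B (the rewrite author's own statement) =====
-- stated objective: faster
-- what changed: Replaces A's per-id rescans of the whole predictions list (to collect answers and to locate each priority model by filename) with a single pass that builds an id->Counter vote table and a first-wins filename->prediction index, followed by a separate resolution pass over predictions[0]'s keys.
-- outside the precondition, e.g. on hard_voting_with_priority([], []): A raises IndexError, B raises IndexError
import Mathlib
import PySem

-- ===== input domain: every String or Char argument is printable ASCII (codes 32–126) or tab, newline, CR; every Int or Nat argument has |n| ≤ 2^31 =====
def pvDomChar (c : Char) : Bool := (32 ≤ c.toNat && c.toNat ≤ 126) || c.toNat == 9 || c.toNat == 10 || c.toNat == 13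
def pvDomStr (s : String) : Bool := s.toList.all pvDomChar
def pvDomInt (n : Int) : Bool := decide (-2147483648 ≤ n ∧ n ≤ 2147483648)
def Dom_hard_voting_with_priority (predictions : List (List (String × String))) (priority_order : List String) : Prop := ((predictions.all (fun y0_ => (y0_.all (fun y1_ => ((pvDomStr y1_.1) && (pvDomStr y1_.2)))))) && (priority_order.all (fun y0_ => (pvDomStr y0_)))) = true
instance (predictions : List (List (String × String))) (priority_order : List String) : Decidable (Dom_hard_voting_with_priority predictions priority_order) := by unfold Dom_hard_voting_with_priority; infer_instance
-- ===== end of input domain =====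

-- B replaces A's per-id rescans of all predictions with one pass building an id → Counter table
-- and a first-wins filename → prediction index, then a separate resolution pass (objective: faster; a timing run measured it).

-- ===== PORT A =====
-- the for-model-in-priority_order loop with its break/else, per id
def pvPrioLoopA (dicts : List (PySem.Dict String String)) (id : String) (top : List String) : List String → String
  | [] => top.headD ""
  | m :: rest =>
    match dicts.findIdx? (fun d => d.get? "filename" == some m) with
    | some i =>
      let ma := (dicts.getD i PySem.Dict.empty).getD id ""
      if ma ∈ top then ma else pvPrioLoopA dicts id top rest
    | none => pvPrioLoopA dicts id top rest

-- the body of A's main loop over predictions[0].keys()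
def pvStepA (dicts : List (PySem.Dict String String)) (priority_order : List String)
    (res : PySem.Dict String String) (id : String) : PySem.Dict String String :=
  let answers := dicts.filterMap (fun d => d.get? id)
  let answer_counts := PySem.Dict.counter (answers.filter (fun a => a != ""))
  if answer_counts.size ≠ 0 then
    let max_count := (PySem.List.max? answer_counts.values (fun x => x)).getD 0
    let top_answers := (answer_counts.items.filter (fun p => p.2 == max_count)).map Prod.fst
    if top_answers.length == 1 then res.insert id (top_answers.headD "")
    else res.insert id (pvPrioLoopA dicts id top_answers priority_order)
  else res.insert id ""

def hard_voting_with_priority (predictions : List (List (String × String))) (priority_order : List String) : List (String × String) :=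
  let dicts := predictions.map PySem.Dict.ofList
  -- predictions[0]: Pre_ excludes the empty list, where Python raises IndexError
  (((dicts.headD PySem.Dict.empty).keys).foldl (pvStepA dicts priority_order) PySem.Dict.empty).items

-- ===== PORT B =====
-- one prediction's contribution to the id → (answer → count) table
def pvVoteStep (v : PySem.Dict String (PySem.Dict String Int)) (d : PySem.Dict String String) : PySem.Dict String (PySem.Dict String Int) :=
  d.items.foldl
    (fun v p => if p.2 != "" then v.modify p.1 PySem.Dict.empty (fun c => c.modify p.2 0 (· + 1)) else v) v

-- first-wins filename → prediction index
def pvFnameStep (b : PySem.Dict String (PySem.Dict String String)) (d : PySem.Dict String String) : PySem.Dict String (PySem.Dict String String) :=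
  match d.get? "filename" with
  | some f => if b.contains f then b else b.insert f d
  | none => b

-- _pick: walk priority_order through the filename index
def pvPick (byf : PySem.Dict String (PySem.Dict String String)) (id : String) (top : List String) : List String → String
  | [] => top.headD ""
  | m :: rest =>
    match byf.get? m with
    | some d =>
      let ma := d.getD id ""
      if ma ∈ top then ma else pvPick byf id top rest
    | none => pvPick byf id top rest

-- the body of B's resolution loop over ids
def pvStepB (votes : PySem.Dict String (PySem.Dict String Int)) (byf : PySem.Dict String (PySem.Dict String String))
    (priority_order : List String) (res : PySem.Dict String String) (id : String) : PySem.Dict String String :=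
  let counts := votes.getD id PySem.Dict.empty
  if counts.size = 0 then res.insert id ""
  else
    let mx := (PySem.List.max? counts.values (fun x => x)).getD 0
    let top := (counts.items.filter (fun p => p.2 == mx)).map Prod.fst
    if top.length == 1 then res.insert id (top.headD "")
    else res.insert id (pvPick byf id top priority_order)

def hard_voting_with_priority_alt (predictions : List (List (String × String))) (priority_order : List String) : List (String × String) :=
  let dicts := predictions.map PySem.Dict.ofList
  let ids := (dicts.headD PySem.Dict.empty).keys
  let st := dicts.foldl (fun st d => (pvVoteStep st.1 d, pvFnameStep st.2 d))
    ((PySem.Dict.empty : PySem.Dict String (PySem.Dict String Int)), (PySem.Dict.empty : PySem.Dict String (PySem.Dict String String)))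
  (ids.foldl (pvStepB st.1 st.2 priority_order) PySem.Dict.empty).items

-- ===== PRECONDITION & SPEC =====
-- Pre_ excludes only the empty predictions list, on which Python A raises IndexError at predictions[0]
def Pre_hard_voting_with_priority (predictions : List (List (String × String))) (priority_order : List String) : Prop :=
  predictions ≠ []
instance (predictions : List (List (String × String))) (priority_order : List String) : Decidable (Pre_hard_voting_with_priority predictions priority_order) := by unfold Pre_hard_voting_with_priority; infer_instance
def pvWitness_hard_voting_with_priority : (List (List (String × String))) × List String :=
  ([[("q1", "A"), ("q2", "B")], [("q1", "A")]], ["m1"])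

def Spec_hard_voting_with_priority (predictions : List (List (String × String))) (priority_order : List String) (out : List (String × String)) : Prop := out = hard_voting_with_priority_alt predictions priority_order
instance (predictions : List (List (String × String))) (priority_order : List String) (out : List (String × String)) : Decidable (Spec_hard_voting_with_priority predictions priority_order out) := by unfold Spec_hard_voting_with_priority; infer_instance

-- ===== CLAIM (what is proved, stated in full; the proofs are below) =====
def Claim_equal_hard_voting_with_priority : Prop := ∀ (predictions : List (List (String × String))) (priority_order : List String), Dom_hard_voting_with_priority predictions priority_order → Pre_hard_voting_with_priority predictions priority_order → Spec_hard_voting_with_priority predictions priority_order (hard_voting_with_priority predictions priority_order)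

-- ===== LEMMAS AND PROOFS =====

-- the effect of one prediction on one id's counter
def pvUpd (o : Option String) (c : PySem.Dict String Int) : PySem.Dict String Int :=
  match o with
  | some a => if a != "" then c.modify a 0 (· + 1) else c
  | none => c

theorem pv_fold_untouched (ps : List (String × String)) (id : String)
    (h : id ∉ ps.map Prod.fst) (v : PySem.Dict String (PySem.Dict String Int)) :
    (ps.foldl (fun v p => if p.2 != "" then v.modify p.1 PySem.Dict.empty (fun c => c.modify p.2 0 (· + 1)) else v) v).getD id PySem.Dict.empty
      = v.getD id PySem.Dict.empty := by
  induction ps generalizing v with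
  | nil => rfl
  | cons p rest ih =>
    simp only [List.map_cons, List.mem_cons, not_or] at h
    rw [List.foldl_cons, ih h.2 _]
    by_cases hp : p.2 != ""
    · simp only [hp, if_true]
      rw [PySem.Dict.getD_modify_of_ne _ _ _ h.1]
    · simp [hp]

theorem pv_fold_pairs (ps : List (String × String)) (id : String)
    (hnd : (ps.map Prod.fst).Nodup) (v : PySem.Dict String (PySem.Dict String Int)) :
    (ps.foldl (fun v p => if p.2 != "" then v.modify p.1 PySem.Dict.empty (fun c => c.modify p.2 0 (· + 1)) else v) v).getD id PySem.Dict.empty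
      = pvUpd ((ps.find? (fun p => p.1 == id)).map Prod.snd) (v.getD id PySem.Dict.empty) := by
  induction ps generalizing v with
  | nil => rfl
  | cons p rest ih =>
    simp only [List.map_cons, List.nodup_cons] at hnd
    rw [List.foldl_cons]
    by_cases hk : p.1 = id
    · subst hk
      rw [pv_fold_untouched rest p.1 hnd.1 _]
      rw [List.find?_cons_of_pos (by simp)]
      by_cases hp : p.2 != ""
      · simp only [hp, if_true, pvUpd, Option.map_some]
        rw [PySem.Dict.getD_modify_self]
      · simp only [Bool.not_eq_true] at hp
        simp [hp, pvUpd]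
    · rw [ih hnd.2 _]
      rw [List.find?_cons_of_neg (by simp [hk])]
      congr 1
      by_cases hp : p.2 != ""
      · simp only [hp, if_true]
        rw [PySem.Dict.getD_modify_of_ne _ _ _ (fun e => hk e.symm)]
      · simp [hp]

theorem pv_get?_eq_find_items (d : PySem.Dict String String) (id : String) :
    (d.items.find? (fun p => p.1 == id)).map Prod.snd = d.get? id := by
  obtain ⟨l⟩ := d
  induction l with
  | nil => rfl
  | cons p rest ih =>
    show ((p :: rest).find? (fun p => p.1 == id)).map Prod.snd = (PySem.Dict.mk (p :: rest)).get? id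
    rw [PySem.Dict.get?_mk_cons]
    by_cases hk : p.1 = id
    · rw [List.find?_cons_of_pos (by simp [hk])]
      simp [hk]
    · rw [List.find?_cons_of_neg (by simp [hk])]
      simp only [show (p.1 == id) = false by simp [hk], Bool.false_eq_true, if_false]
      exact ih

theorem pv_voteStep_getD (d : PySem.Dict String String) (hnd : d.keys.Nodup) (id : String)
    (v : PySem.Dict String (PySem.Dict String Int)) :
    (pvVoteStep v d).getD id PySem.Dict.empty = pvUpd (d.get? id) (v.getD id PySem.Dict.empty) := by
  simp only [PySem.Dict.keys] at hnd
  rw [pvVoteStep, pv_fold_pairs d.items id hnd v, pv_get?_eq_find_items]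

theorem pv_votes_fold (dicts : List (PySem.Dict String String)) (h : ∀ d ∈ dicts, d.keys.Nodup)
    (id : String) (v0 : PySem.Dict String (PySem.Dict String Int)) (b0 : PySem.Dict String (PySem.Dict String String)) :
    ((dicts.foldl (fun st d => (pvVoteStep st.1 d, pvFnameStep st.2 d)) (v0, b0)).1).getD id PySem.Dict.empty
      = ((dicts.filterMap (fun d => d.get? id)).filter (fun a => a != "")).foldl
          (fun c a => c.modify a 0 (· + 1)) (v0.getD id PySem.Dict.empty) := by
  induction dicts generalizing v0 b0 with
  | nil => rfl
  | cons d rest ih =>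
    rw [List.foldl_cons, ih (fun d hd => h d (List.mem_cons_of_mem _ hd))]
    rw [pv_voteStep_getD d (h d List.mem_cons_self) id v0]
    cases hg : d.get? id with
    | none => simp [pvUpd, hg]
    | some a =>
      by_cases ha : a != ""
      · simp [pvUpd, hg, ha]
      · simp only [Bool.not_eq_true] at ha
        simp [pvUpd, hg, ha]

theorem pv_fname_fold (dicts : List (PySem.Dict String String)) (m : String)
    (v0 : PySem.Dict String (PySem.Dict String Int)) (b0 : PySem.Dict String (PySem.Dict String String)) :
    ((dicts.foldl (fun st d => (pvVoteStep st.1 d, pvFnameStep st.2 d)) (v0, b0)).2).get? m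
      = match b0.get? m with
        | some d => some d
        | none => dicts.find? (fun d => d.get? "filename" == some m) := by
  induction dicts generalizing v0 b0 with
  | nil =>
    simp only [List.foldl_nil, List.find?_nil]
    cases hb : b0.get? m <;> simp
  | cons d rest ih =>
    rw [List.foldl_cons, ih]
    show (match (pvFnameStep b0 d).get? m with
          | some d => some d
          | none => rest.find? (fun d => d.get? "filename" == some m)) = _
    unfold pvFnameStep
    cases hf : d.get? "filename" with
    | none =>
      cases hm : b0.get? m with
      | some e => rfl
      | none =>
        rw [List.find?_cons_of_neg (p := fun (e : PySem.Dict String String) => e.get? "filename" == some m) (by simp [hf])]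
    | some f =>
      by_cases hc : b0.contains f
      · simp only [hc, if_true]
        cases hm : b0.get? m with
        | some e => rfl
        | none =>
          have hne : ¬ ((fun (e : PySem.Dict String String) => e.get? "filename" == some m) d) = true := by
            simp only [hf, beq_iff_eq, Option.some.injEq]
            intro he; subst he
            rw [PySem.Dict.contains_eq_isSome_get?, hm] at hc
            simp at hc
          rw [List.find?_cons_of_neg (p := fun (e : PySem.Dict String String) => e.get? "filename" == some m) hne]
      · simp only [hc, if_false, Bool.false_eq_true]
        by_cases hm : m = f
        · subst hm
          have h0 : b0.get? m = none := by
            rw [PySem.Dict.get?_eq_none_iff_contains]; exact (Bool.not_eq_true _).mp hc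
          rw [PySem.Dict.get?_insert]
          simp only [reduceIte]
          rw [List.find?_cons_of_pos (p := fun (e : PySem.Dict String String) => e.get? "filename" == some m) (by simp [hf])]
          simp [h0]
        · rw [PySem.Dict.get?_insert]
          simp only [if_neg hm]
          cases hmm : b0.get? m with
          | some e => rfl
          | none =>
            rw [List.find?_cons_of_neg (p := fun (e : PySem.Dict String String) => e.get? "filename" == some m)
              (by simp only [hf, beq_iff_eq, Option.some.injEq]; exact fun e => hm e.symm)]

theorem pv_findIdx?_getD {α : Type} (l : List α) (p : α → Bool) (dflt : α) :
    (match l.findIdx? p with | some i => some (l.getD i dflt) | none => none) = l.find? p := by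
  induction l with
  | nil => rfl
  | cons x xs ih =>
    rw [List.findIdx?_cons]
    by_cases hx : p x
    · rw [if_pos hx, List.find?_cons_of_pos hx]
      rfl
    · rw [if_neg (by simp [hx]), List.find?_cons_of_neg (by simp [hx]), ← ih]
      cases h : xs.findIdx? p with
      | none => rfl
      | some i => simp

theorem pv_prio_eq (dicts : List (PySem.Dict String String)) (id : String) (top : List String)
    (byf : PySem.Dict String (PySem.Dict String String))
    (hb : ∀ m, byf.get? m = dicts.find? (fun d => d.get? "filename" == some m))
    (prio : List String) :
    pvPrioLoopA dicts id top prio = pvPick byf id top prio := by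
  induction prio with
  | nil => rfl
  | cons m rest ih =>
    unfold pvPrioLoopA pvPick
    rw [hb m, ← pv_findIdx?_getD dicts (fun d => d.get? "filename" == some m) PySem.Dict.empty]
    cases h : dicts.findIdx? (fun d => d.get? "filename" == some m) with
    | none => exact ih
    | some i =>
      simp only []
      rw [ih]

theorem pv_step_eq (dicts : List (PySem.Dict String String)) (h : ∀ d ∈ dicts, d.keys.Nodup)
    (priority_order : List String) :
    pvStepA dicts priority_order
      = pvStepB (dicts.foldl (fun st d => (pvVoteStep st.1 d, pvFnameStep st.2 d)) (PySem.Dict.empty, PySem.Dict.empty)).1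
                (dicts.foldl (fun st d => (pvVoteStep st.1 d, pvFnameStep st.2 d)) (PySem.Dict.empty, PySem.Dict.empty)).2
                priority_order := by
  funext res id
  have hv : ((dicts.foldl (fun st d => (pvVoteStep st.1 d, pvFnameStep st.2 d)) (PySem.Dict.empty, PySem.Dict.empty)).1).getD id PySem.Dict.empty
      = PySem.Dict.counter ((dicts.filterMap (fun d => d.get? id)).filter (fun a => a != "")) := by
    rw [pv_votes_fold dicts h id PySem.Dict.empty PySem.Dict.empty, PySem.Dict.getD_empty,
      ← PySem.Dict.counter_eq_foldl]
  have hbf : ∀ m, ((dicts.foldl (fun st d => (pvVoteStep st.1 d, pvFnameStep st.2 d)) (PySem.Dict.empty, PySem.Dict.empty)).2).get? m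
      = dicts.find? (fun d => d.get? "filename" == some m) := by
    intro m
    rw [pv_fname_fold dicts m PySem.Dict.empty PySem.Dict.empty, PySem.Dict.get?_empty]
  simp only [pvStepA, pvStepB, hv]
  by_cases hsz : (PySem.Dict.counter ((dicts.filterMap (fun d => d.get? id)).filter (fun a => a != ""))).size = 0
  · simp [hsz]
  · simp only [hsz, if_neg, ne_eq, not_false_iff, if_true]
    rw [pv_prio_eq dicts id _ _ hbf]

-- ===== VERDICT (by name: the statement is the Claim_ definition above) =====
theorem hard_voting_with_priority_spec : Claim_equal_hard_voting_with_priority := by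
  intro predictions priority_order _ _
  unfold Spec_hard_voting_with_priority
  unfold hard_voting_with_priority hard_voting_with_priority_alt
  simp only []
  rw [pv_step_eq]
  intro d hd
  simp only [List.mem_map] at hd
  obtain ⟨l, _, rfl⟩ := hd
  exact PySem.Dict.nodup_keys_ofList l
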